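-- pv_equiv track=rewrite | github.com/lovett/medley | apps/recipes/main.py | isolate_ingredients
-- ===== SOURCE A (Python) =====
-- from typing import Tuple
--
-- def isolate_ingredients(text: str) -> Tuple[str, str]:
--     """Separate the list of ingredients from the rest of the recipe."""
--
--     ingredients = ""
--     rest = ""
--
--     for line in text.splitlines():
--         if line.strip().startswith("-") and not rest:
--             ingredients += line + "\n"
--         else:
--             rest += line + "\n"
--
--     return (ingredients, rest)
-- ===== SOURCE B (Python) =====
-- from typing import Tuple
--
-- def isolate_ingredients(text: str) -> Tuple[str, str]:
--     """Separate the list of ingredients from the rest of the recipe."""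
--     lines = text.splitlines()
--     n = 0
--     for line in lines:
--         if not line.strip().startswith("-"):
--             break
--         n += 1
--     ingredients = "".join(l + "\n" for l in lines[:n])
--     rest = "".join(l + "\n" for l in lines[n:])
--     return (ingredients, rest)
-- ===== Notes on version B (the rewrite author's own statement) =====
-- stated objective: alternative
-- what changed: Instead of a single stateful loop that routes each line by testing whether 'rest' is still empty, B finds the boundary index n of the leading run of '-'-lines, slices the line list there and joins each block once.
import Mathlib
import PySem

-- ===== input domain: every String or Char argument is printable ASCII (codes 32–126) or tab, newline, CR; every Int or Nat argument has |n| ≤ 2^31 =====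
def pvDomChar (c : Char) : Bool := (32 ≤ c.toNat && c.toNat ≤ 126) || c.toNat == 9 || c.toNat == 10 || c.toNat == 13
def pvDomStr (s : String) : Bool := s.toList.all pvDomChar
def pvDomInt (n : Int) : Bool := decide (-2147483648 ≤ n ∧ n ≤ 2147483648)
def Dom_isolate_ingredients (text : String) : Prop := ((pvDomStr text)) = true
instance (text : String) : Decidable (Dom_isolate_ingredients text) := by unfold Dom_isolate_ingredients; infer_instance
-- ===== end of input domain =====

-- B replaces A's single stateful routing loop by an explicit boundary: count the leading run of
-- '-'-lines, slice there, and join each block once (objective: alternative decomposition).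


-- ===== PORT A =====
-- line.strip().startswith('-'), the test both Pythons spell out
def pvDash (line : String) : Bool := PySem.Str.startswith (PySem.Str.strip line) "-"

-- A's loop body: if line.strip().startswith('-') and not rest: ingredients += line+'\n' else: rest += line+'\n'
def pvStepA (st : String × String) (line : String) : String × String :=
  if pvDash line && (st.2 == "") then (st.1 ++ line ++ "\n", st.2)
  else (st.1, st.2 ++ line ++ "\n")

def isolate_ingredients (text : String) : String × String :=
  (PySem.Str.splitlines text).foldl pvStepA ("", "")

-- ===== PORT B =====
-- the counting loop of Source B: length of the leading run of lines whose strip() starts with '-'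
def pvCountDash : List String → Nat
  | [] => 0
  | l :: ls =>
      if pvDash l then pvCountDash ls + 1 else 0

def isolate_ingredients_alt (text : String) : String × String :=
  let lines := PySem.Str.splitlines text
  let n := pvCountDash lines
  (PySem.Str.join "" ((lines.take n).map (fun l => l ++ "\n")),
   PySem.Str.join "" ((lines.drop n).map (fun l => l ++ "\n")))

-- ===== PRECONDITION & SPEC =====
def Spec_isolate_ingredients (text : String) (out : String × String) : Prop := out = isolate_ingredients_alt text
instance (text : String) (out : String × String) : Decidable (Spec_isolate_ingredients text out) := by unfold Spec_isolate_ingredients; infer_instance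

-- ===== CLAIM (what is proved, stated in full; the proofs are below) =====
def Claim_equal_isolate_ingredients : Prop := ∀ (text : String), Dom_isolate_ingredients text → Spec_isolate_ingredients text (isolate_ingredients text)

-- ===== LEMMAS AND PROOFS =====

theorem pv_join0_nil : PySem.Str.join "" ([] : List String) = "" := by
  simp [PySem.Str.join, PySem.Chars.join, List.intercalate]

theorem pv_join0_cons (x : String) (xs : List String) :
    PySem.Str.join "" (x :: xs) = x ++ PySem.Str.join "" xs := by
  cases xs with
  | nil => simp [PySem.Str.join, PySem.Chars.join, List.intercalate]
  | cons y ys =>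
      simp [PySem.Str.join, PySem.Chars.join, List.intercalate, String.ofList_append]

theorem pv_append_newline_ne (s : String) : s ++ "\n" ≠ "" := by
  intro h
  have := congrArg String.toList h
  simp at this

theorem pvStepA_rest (ing rest l : String) (h : rest ≠ "") :
    pvStepA (ing, rest) l = (ing, rest ++ l ++ "\n") := by
  simp [pvStepA, h]

theorem pvStepA_dash (ing l : String) (h : pvDash l = true) :
    pvStepA (ing, "") l = (ing ++ l ++ "\n", "") := by
  simp [pvStepA, h]

theorem pvStepA_nodash (ing l : String) (h : pvDash l = false) :
    pvStepA (ing, "") l = (ing, "" ++ l ++ "\n") := by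
  simp [pvStepA, h]

-- once rest is nonempty, every remaining line is appended to rest
theorem pv_foldl_rest_ne (ls : List String) :
    ∀ (ing rest : String), rest ≠ "" →
      ls.foldl pvStepA (ing, rest)
        = (ing, rest ++ PySem.Str.join "" (ls.map (fun l => l ++ "\n"))) := by
  induction ls with
  | nil => intro ing rest _; simp [pv_join0_nil]
  | cons l tl ih =>
      intro ing rest hrest
      rw [List.foldl_cons, pvStepA_rest ing rest l hrest,
        ih ing (rest ++ l ++ "\n") (pv_append_newline_ne _)]
      simp [pv_join0_cons, String.append_assoc]

-- while rest is empty, A's loop splits at the first non-dash line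
theorem pv_foldl_empty (ls : List String) :
    ∀ (ing : String),
      ls.foldl pvStepA (ing, "")
        = (ing ++ PySem.Str.join "" ((ls.takeWhile pvDash).map (fun l => l ++ "\n")),
           PySem.Str.join "" ((ls.dropWhile pvDash).map (fun l => l ++ "\n"))) := by
  induction ls with
  | nil => intro ing; simp [pv_join0_nil]
  | cons l tl ih =>
      intro ing
      cases hd : pvDash l with
      | true =>
          rw [List.foldl_cons, pvStepA_dash ing l hd, ih (ing ++ l ++ "\n"),
            List.takeWhile_cons_of_pos hd, List.dropWhile_cons_of_pos hd]
          simp [pv_join0_cons, String.append_assoc]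
      | false =>
          rw [List.foldl_cons, pvStepA_nodash ing l hd,
            pv_foldl_rest_ne tl ing ("" ++ l ++ "\n") (by simp),
            List.takeWhile_cons_of_neg (by simp [hd]), List.dropWhile_cons_of_neg (by simp [hd])]
          simp [pv_join0_nil, pv_join0_cons]

-- B's counter is the length of the leading dash run: slicing at it is takeWhile/dropWhile
theorem pv_take_count (ls : List String) : ls.take (pvCountDash ls) = ls.takeWhile pvDash := by
  induction ls with
  | nil => rfl
  | cons l tl ih =>
      cases hd : pvDash l with
      | true => rw [pvCountDash, if_pos hd, List.take_succ_cons,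
          List.takeWhile_cons_of_pos hd, ih]
      | false => rw [pvCountDash, if_neg (by simp [hd]), List.take_zero,
          List.takeWhile_cons_of_neg (by simp [hd])]

theorem pv_drop_count (ls : List String) : ls.drop (pvCountDash ls) = ls.dropWhile pvDash := by
  induction ls with
  | nil => rfl
  | cons l tl ih =>
      cases hd : pvDash l with
      | true => rw [pvCountDash, if_pos hd, List.drop_succ_cons,
          List.dropWhile_cons_of_pos hd, ih]
      | false => rw [pvCountDash, if_neg (by simp [hd]), List.drop_zero,
          List.dropWhile_cons_of_neg (by simp [hd])]

-- ===== VERDICT (by name: the statement is the Claim_ definition above) =====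
theorem isolate_ingredients_spec : Claim_equal_isolate_ingredients := by
  intro text _
  unfold Spec_isolate_ingredients
  simp only [isolate_ingredients, isolate_ingredients_alt]
  rw [pv_foldl_empty _ "", pv_take_count, pv_drop_count]
  simp
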